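-- pv_equiv track=rewrite | github.com/ihaeeun/Algorithms | Python/Programmers/Level3/tile_ornament.py | solution
-- ===== SOURCE A (Python) =====
-- def solution(N):
--     dp = [0 for i in range(N+1)]
--     dp[1] = 4
--
--     edge = [0 for i in range(N+1)]
--     edge[1] = 1
--
--     for i in range(2, N+1):
--         edge[i] = edge[i-2] + edge[i-1]
--         dp[i] = dp[i - 1] + edge[i] * 2
--
--     return dp[N]
-- ===== SOURCE B (Python) =====
-- def solution(N):
--     # dp[N] = 2 * Fib(N+2); compute Fib by fast doubling in O(log N)
--     def fd(n):
--         if n == 0: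
--             return (0, 1)
--         a, b = fd(n >> 1)
--         c = a * (2 * b - a)
--         d = a * a + b * b
--         if n & 1:
--             return (d, c + d)
--         return (c, d)
--     return 2 * fd(N + 2)[0]
-- ===== Notes on version B (the rewrite author's own statement) =====
-- stated objective: faster
-- what changed: Replaced the O(N) dual-array DP with fast-doubling Fibonacci using the closed form dp[N] = 2*Fib(N+2).
import Mathlib
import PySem

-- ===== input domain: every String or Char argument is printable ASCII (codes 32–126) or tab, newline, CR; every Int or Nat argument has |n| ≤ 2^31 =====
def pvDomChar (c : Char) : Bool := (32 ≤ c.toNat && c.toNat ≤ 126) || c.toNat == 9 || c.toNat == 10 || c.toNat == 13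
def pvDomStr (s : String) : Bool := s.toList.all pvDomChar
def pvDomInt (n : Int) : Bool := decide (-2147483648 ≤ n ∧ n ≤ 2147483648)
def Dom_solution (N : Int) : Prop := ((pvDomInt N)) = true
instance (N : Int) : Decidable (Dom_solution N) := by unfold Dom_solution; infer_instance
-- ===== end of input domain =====

-- B replaces A's O(N) dual-array DP by fast-doubling Fibonacci via dp[N] = 2*Fib(N+2) (objective: faster).

-- ===== PORT A =====
-- [0 for i in range(N+1)]
def pvZeros (N : Int) : List Int := (PySem.List.pyRange 0 (N + 1) 1).map (fun _ => 0)

-- the body of A's for-loop; state = (dp, edge); pySetD/pyGetD are exact under Pre_ (indices in range)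
def pvStep (s : List Int × List Int) (i : Int) : List Int × List Int :=
  let edge := PySem.List.pySetD s.2 i
      (PySem.List.pyGetD s.2 (i - 2) 0 + PySem.List.pyGetD s.2 (i - 1) 0)
  let dp := PySem.List.pySetD s.1 i
      (PySem.List.pyGetD s.1 (i - 1) 0 + PySem.List.pyGetD edge i 0 * 2)
  (dp, edge)

def solution (N : Int) : Int :=
  let dp := PySem.List.pySetD (pvZeros N) 1 4
  let edge := PySem.List.pySetD (pvZeros N) 1 1
  let s := (PySem.List.pyRange 2 (N + 1) 1).foldl pvStep (dp, edge)
  PySem.List.pyGetD s.1 N 0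

-- ===== PORT B =====
-- fast doubling: fastDouble n = (Fib n, Fib (n+1))
def fastDouble : Nat → Int × Int
  | 0 => (0, 1)
  | n + 1 =>
    let p := fastDouble ((n + 1) / 2)
    let a := p.1
    let b := p.2
    let c := a * (2 * b - a)
    let d := a * a + b * b
    if (n + 1) % 2 = 1 then (d, c + d) else (c, d)
decreasing_by omega

def solution_alt (N : Int) : Int := 2 * (fastDouble (N + 2).toNat).1

-- ===== PRECONDITION & SPEC =====
-- A raises IndexError for N ≤ 0 (dp[1] or dp[N] out of range)
def Pre_solution (N : Int) : Prop := 1 ≤ N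
instance (N : Int) : Decidable (Pre_solution N) := by unfold Pre_solution; infer_instance
def pvWitness_solution : Int := 3

def Spec_solution (N : Int) (out : Int) : Prop := out = solution_alt N
instance (N : Int) (out : Int) : Decidable (Spec_solution N out) := by unfold Spec_solution; infer_instance

-- ===== CLAIM (what is proved, stated in full; the proofs are below) =====
def Claim_equal_solution : Prop := ∀ (N : Int), Dom_solution N → Pre_solution N → Spec_solution N (solution N)

-- ===== LEMMAS AND PROOFS =====

-- B's port computes Fibonacci pairs
theorem fastDouble_eq (n : Nat) : fastDouble n = ((Nat.fib n : Int), (Nat.fib (n + 1) : Int)) := by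
  induction n using Nat.strong_induction_on with
  | _ n ih =>
    match n with
    | 0 => simp [fastDouble]
    | k + 1 =>
      have hlt : (k + 1) / 2 < k + 1 := by omega
      rw [fastDouble, ih _ hlt]
      set m := (k + 1) / 2 with hm
      have hle : Nat.fib m ≤ 2 * Nat.fib (m + 1) :=
        le_trans (Nat.fib_le_fib_succ) (Nat.le_mul_of_pos_left _ (by norm_num))
      have h1 : ((Nat.fib (2 * m) : Int)) = (Nat.fib m : Int) * (2 * (Nat.fib (m + 1) : Int) - (Nat.fib m : Int)) := by
        rw [Nat.fib_two_mul, Nat.cast_mul, Nat.cast_sub hle]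
        push_cast
        ring
      have h2 : ((Nat.fib (2 * m + 1) : Int)) = (Nat.fib m : Int) * (Nat.fib m : Int) + (Nat.fib (m + 1) : Int) * (Nat.fib (m + 1) : Int) := by
        rw [Nat.fib_two_mul_add_one]
        push_cast
        ring
      rcases Nat.even_or_odd (k + 1) with he | ho
      · obtain ⟨j, hj⟩ := he
        have h2m : k + 1 = 2 * m := by omega
        have hmod : (k + 1) % 2 = 0 := by omega
        rw [h2m, h1, h2]
        norm_num [hmod, h2m]
      · have h2m : k + 1 = 2 * m + 1 := by
          rcases ho with ⟨j, hj⟩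
          omega
        have hmod : (k + 1) % 2 = 1 := by omega
        have h3 : ((Nat.fib (2 * m + 2) : Int)) = (Nat.fib (2 * m) : Int) + (Nat.fib (2 * m + 1) : Int) := by
          rw [Nat.fib_add_two]
          push_cast
          ring
        rw [h2m, h3, h1, h2]
        norm_num [hmod, h2m]

theorem zeros_eq (N : Int) (h : 1 ≤ N) : pvZeros N = List.replicate (N.toNat + 1) 0 := by
  unfold pvZeros
  rw [PySem.List.pyRange_one]
  have hlen : (N + 1 - 0).toNat = N.toNat + 1 := by omega
  rw [hlen]
  simp [Function.comp_def, List.map_const', List.length_range]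

theorem pySetD_one (xs : List Int) (v : Int) : PySem.List.pySetD xs 1 v = xs.set 1 v := by
  rw [PySem.List.pySetD_of_nonneg xs v (show (0 : Int) ≤ 1 by norm_num)]
  norm_num

-- loop invariant: after folding range(2, k+1), lengths are N.toNat+1, edge holds fib at k-1 and k, dp holds 2*fib(k+2) at k
theorem loop_inv (N : Int) (hN : 1 ≤ N) (k : Nat) (hk1 : 1 ≤ k) (hkN : k ≤ N.toNat) :
    let s := (PySem.List.pyRange 2 ((k : Int) + 1) 1).foldl pvStep
      (PySem.List.pySetD (pvZeros N) 1 4, PySem.List.pySetD (pvZeros N) 1 1)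
    s.1.length = N.toNat + 1 ∧ s.2.length = N.toNat + 1 ∧
      s.2.getD (k - 1) 0 = (Nat.fib (k - 1) : Int) ∧
      s.2.getD k 0 = (Nat.fib k : Int) ∧
      s.1.getD k 0 = 2 * (Nat.fib (k + 2) : Int) := by
  induction k, hk1 using Nat.le_induction with
  | base =>
    intro s
    have hnil : PySem.List.pyRange 2 ((1 : Nat) + 1 : Int) 1 = [] :=
      PySem.List.pyRange_one_eq_nil (by norm_num)
    have hs : s = (PySem.List.pySetD (pvZeros N) 1 4, PySem.List.pySetD (pvZeros N) 1 1) := by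
      simp only [s]
      norm_num [hnil]
    have h11 : (1 : Nat) < N.toNat + 1 := by omega
    rw [hs, zeros_eq N hN, pySetD_one, pySetD_one]
    refine ⟨by simp, by simp, ?_, ?_, ?_⟩
    · simp [List.getD_eq_getElem?_getD]
    · simp [List.getD_eq_getElem?_getD, List.getElem?_set, h11]
    · simp [List.getD_eq_getElem?_getD, List.getElem?_set, h11]
      decide
  | succ k hk1 ihfull =>
    intro s
    have hkN' : k ≤ N.toNat := by omega
    have ih := ihfull hkN'
    set t := (PySem.List.pyRange 2 ((k : Int) + 1) 1).foldl pvStep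
      (PySem.List.pySetD (pvZeros N) 1 4, PySem.List.pySetD (pvZeros N) 1 1) with ht
    obtain ⟨hl1, hl2, he1, he2, hd⟩ := ih
    have hsplit : PySem.List.pyRange 2 (((k + 1 : Nat) : Int) + 1) 1
        = PySem.List.pyRange 2 ((k : Int) + 1) 1 ++ [(k : Int) + 1] := by
      have hb : (((k + 1 : Nat) : Int) + 1) = ((k : Int) + 1) + 1 := by push_cast; ring
      rw [hb, PySem.List.pyRange_one_succ_right (by omega)]
    have hs : s = pvStep t ((k : Int) + 1) := by
      simp only [s, hsplit, List.foldl_append, List.foldl_cons, List.foldl_nil, ht]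
    have hik : (k : Int) + 1 = (((k + 1 : Nat) : Int)) := by push_cast; ring
    have hi2' : (((k + 1 : Nat) : Int)) - 2 = ((k - 1 : Nat) : Int) := by push_cast; omega
    have hi1' : (((k + 1 : Nat) : Int)) - 1 = ((k : Nat) : Int) := by push_cast; omega
    have hkb : k + 1 < N.toNat + 1 := by omega
    rw [hs]
    unfold pvStep
    simp only [hik, PySem.List.pySetD_natCast]
    simp only [hi2', hi1', PySem.List.pyGetD_natCast, Nat.add_sub_cancel]
    rw [he1, he2, hd]
    have hfe : (Nat.fib (k - 1) : Int) + (Nat.fib k : Int) = (Nat.fib (k + 1) : Int) := by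
      have e1 : k - 1 + 2 = k + 1 := by omega
      have e2 : k - 1 + 1 = k := by omega
      rw [← e1, Nat.fib_add_two, e2]
      push_cast
      ring
    have hget_new : (t.2.set (k + 1) ((Nat.fib (k - 1) : Int) + (Nat.fib k : Int))).getD (k + 1) 0
        = (Nat.fib (k + 1) : Int) := by
      rw [List.getD_eq_getElem?_getD, List.getElem?_set]
      simp [hl2, hkb, hfe]
    rw [hget_new]
    refine ⟨by simp [hl1], by simp [hl2], ?_, ?_, ?_⟩
    · rw [List.getD_eq_getElem?_getD, List.getElem?_set]
      simp [← List.getD_eq_getElem?_getD, he2]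
    · rfl
    · rw [List.getD_eq_getElem?_getD, List.getElem?_set,
        if_pos rfl, if_pos (show k + 1 < t.1.length by rw [hl1]; exact hkb), Option.getD_some]
      have h3 : (Nat.fib (k + 1 + 2) : Int) = (Nat.fib (k + 1) : Int) + (Nat.fib (k + 2) : Int) := by
        rw [Nat.fib_add_two, show k + 1 + 1 = k + 2 from rfl]
        push_cast
        ring
      rw [h3]
      ring

-- ===== VERDICT (by name: the statement is the Claim_ definition above) =====
theorem solution_spec : Claim_equal_solution := by
  intro N _ hPre
  unfold Spec_solution
  have hN : 1 ≤ N := hPre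
  have hNeq : ((N.toNat : Int)) = N := by omega
  have hinv := loop_inv N hN N.toNat (by omega) (le_refl _)
  simp only at hinv
  obtain ⟨hl1, _, _, _, hd⟩ := hinv
  set xs := (PySem.List.pyRange 2 ((N.toNat : Int) + 1) 1).foldl pvStep
      (PySem.List.pySetD (pvZeros N) 1 4, PySem.List.pySetD (pvZeros N) 1 1) with hxs
  have hx : PySem.List.pyGetD xs.1 N 0 = xs.1.getD N.toNat 0 := by
    conv_lhs => rw [← hNeq, PySem.List.pyGetD_natCast]
  unfold solution
  rw [show (N + 1 : Int) = ((N.toNat : Int) + 1) by omega]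
  simp only [← hxs]
  rw [hx, hd]
  unfold solution_alt
  rw [show ((N + 2 : Int)).toNat = N.toNat + 2 by omega, fastDouble_eq]
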